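-- pv_equiv track=rewrite | github.com/Desilo/liberate-fhe | src/liberate/fhe/context/security_parameters.py | partitq
-- ===== SOURCE A (Python) =====
-- security_levels = [128, 192, 256]
--
-- def partitq(q):
--     qlen = len(q)
--     levlen = len(security_levels)
--     grouped = [
--         [q[i] for i in range(0 + lev, qlen, levlen)] for lev in range(levlen)
--     ]
--     by_sec_lev = {lev: grouped[l] for l, lev in enumerate(security_levels)}
--     return by_sec_lev
-- ===== SOURCE B (Python) =====
-- security_levels = [128, 192, 256]
--
-- def partitq(q):
--     # one scatter pass instead of three strided gather passes
--     by_sec_lev = {lev: [] for lev in security_levels}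
--     for i, val in enumerate(q):
--         by_sec_lev[security_levels[i % len(security_levels)]].append(val)
--     return by_sec_lev
-- ===== Notes on version B (the rewrite author's own statement) =====
-- stated objective: alternative
-- what changed: Replaces A's three strided gather passes (one comprehension per security level) by a single scatter pass over enumerate(q) appending each element to the bucket chosen by i mod 3, with the dict pre-seeded so all three keys are always present.
import Mathlib
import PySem

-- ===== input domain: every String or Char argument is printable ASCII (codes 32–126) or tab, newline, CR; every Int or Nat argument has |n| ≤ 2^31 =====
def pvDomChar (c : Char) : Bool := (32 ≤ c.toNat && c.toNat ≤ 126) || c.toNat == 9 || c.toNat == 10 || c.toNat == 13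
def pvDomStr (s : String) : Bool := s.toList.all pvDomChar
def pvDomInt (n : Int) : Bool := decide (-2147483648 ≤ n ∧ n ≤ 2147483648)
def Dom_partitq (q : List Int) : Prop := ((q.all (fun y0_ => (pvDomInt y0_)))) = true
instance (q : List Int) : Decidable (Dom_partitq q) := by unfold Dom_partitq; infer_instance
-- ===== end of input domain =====

-- B replaces A's three strided gather passes by one scatter pass over enumerate(q) into pre-seeded buckets (alternative decomposition, same cost).


-- module constant security_levels = [128, 192, 256]
def securityLevels : List Int := [128, 192, 256]

-- ===== PORT A =====
-- grouped = [[q[i] for i in range(0+lev, qlen, levlen)] for lev in range(levlen)];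
-- the indices i are always in range, so q[i] is ported as pyGetD with an unused default 0;
-- the dict comprehension over enumerate(security_levels) (distinct keys) is the assoc list built in the same order.
def partitq (q : List Int) : List (Int × List Int) :=
  let qlen : Int := q.length
  let levlen : Int := securityLevels.length
  let grouped : List (List Int) :=
    (PySem.List.pyRange 0 levlen 1).map (fun lev =>
      (PySem.List.pyRange (0 + lev) qlen levlen).map (fun i => PySem.List.pyGetD q i 0))
  (PySem.List.enumerate securityLevels 0).map
    (fun p => (p.2, PySem.List.pyGetD grouped p.1 []))

-- ===== PORT B =====
-- by_sec_lev = {lev: [] for lev in security_levels}; then one pass over enumerate(q)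
-- appending val to the bucket keyed by security_levels[i % len(security_levels)].
def partitq_alt (q : List Int) : List (Int × List Int) :=
  ((PySem.List.enumerate q 0).foldl
    (fun d p =>
      d.modify (PySem.List.pyGetD securityLevels (PySem.Int.mod p.1 (securityLevels.length : Int)) 0)
        [] (fun b => b ++ [p.2]))
    (PySem.Dict.ofList (securityLevels.map (fun lev => (lev, ([] : List Int)))))).items

-- ===== PRECONDITION & SPEC =====
def Spec_partitq (q : List Int) (out : List (Int × List Int)) : Prop := out = partitq_alt q
instance (q : List Int) (out : List (Int × List Int)) : Decidable (Spec_partitq q out) := by unfold Spec_partitq; infer_instance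

-- ===== CLAIM (what is proved, stated in full; the proofs are below) =====
def Claim_equal_partitq : Prop := ∀ (q : List Int), Dom_partitq q → Spec_partitq q (partitq q)

-- ===== LEMMAS AND PROOFS =====

-- the common specification: bucket elements of q by (s + position) % 3
def bk : List Int → Nat → List Int × List Int × List Int
  | [], _ => ([], [], [])
  | x :: t, s =>
    let r := bk t (s + 1)
    if s % 3 = 0 then (x :: r.1, r.2.1, r.2.2)
    else if s % 3 = 1 then (r.1, x :: r.2.1, r.2.2)
    else (r.1, r.2.1, x :: r.2.2)

theorem bk_succ (t : List Int) : ∀ s, bk t (s + 1) = ((bk t s).2.2, (bk t s).1, (bk t s).2.1) := by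
  induction t with
  | nil => intro s; simp [bk]
  | cons x t ih =>
    intro s
    have h3 : (s + 1) % 3 = 0 ∧ s % 3 = 2 ∨ (s + 1) % 3 = 1 ∧ s % 3 = 0 ∨ (s + 1) % 3 = 2 ∧ s % 3 = 1 := by omega
    rcases h3 with ⟨h1, h2⟩ | ⟨h1, h2⟩ | ⟨h1, h2⟩ <;> simp [bk, h1, h2, ih]

-- step-3 range recursion and shift (specific to this file's stride-3 loops)
theorem pyRange3_cons (a b : Int) (h : a < b) :
    PySem.List.pyRange a b 3 = a :: PySem.List.pyRange (a + 3) b 3 := by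
  rw [PySem.List.pyRange_of_pos a b (by norm_num), PySem.List.pyRange_of_pos (a + 3) b (by norm_num)]
  by_cases h2 : a + 3 < b
  · have hc : ((b - a + 3 - 1) / 3).toNat = ((b - (a + 3) + 3 - 1) / 3).toNat + 1 := by
      have : (b - a + 3 - 1) / 3 = (b - (a + 3) + 3 - 1) / 3 + 1 := by omega
      omega
    simp only [if_pos h, if_pos h2, hc, List.range_succ_eq_map, List.map_cons, List.map_map]
    refine List.cons_eq_cons.mpr ⟨by norm_num, ?_⟩
    apply List.map_congr_left; intro k _
    simp only [Function.comp, Nat.succ_eq_add_one]; push_cast; ring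
  · have hc : ((b - a + 3 - 1) / 3).toNat = 1 := by omega
    simp [if_pos h, if_neg h2, hc, List.range_succ]

theorem pyRange3_shift (a b : Int) :
    PySem.List.pyRange (a + 1) (b + 1) 3 = (PySem.List.pyRange a b 3).map (· + 1) := by
  rw [PySem.List.pyRange_of_pos a b (by norm_num), PySem.List.pyRange_of_pos (a + 1) (b + 1) (by norm_num),
      List.map_map]
  have h2 : (a + 1 < b + 1) ↔ (a < b) := by omega
  have h3 : b + 1 - (a + 1) + 3 - 1 = b - a + 3 - 1 := by ring
  rw [h3, if_congr h2 rfl rfl]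
  apply List.map_congr_left; intro k _; simp only [Function.comp]; ring

-- A's bucket for offset r
def gatherA (r : Nat) (q : List Int) : List Int :=
  (PySem.List.pyRange r q.length 3).map (fun i => PySem.List.pyGetD q i 0)

theorem pyGetD_cons_succ (x : Int) (t : List Int) (i : Int) (h : 0 ≤ i) :
    PySem.List.pyGetD (x :: t) (i + 1) 0 = PySem.List.pyGetD t i 0 := by
  rw [PySem.List.pyGetD_of_nonneg _ _ (by omega : (0:Int) ≤ i + 1),
      PySem.List.pyGetD_of_nonneg _ _ h]
  have hn : (i + 1).toNat = i.toNat + 1 := by omega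
  simp [hn]

theorem gatherA_cons_zero (x : Int) (t : List Int) : gatherA 0 (x :: t) = x :: gatherA 2 t := by
  unfold gatherA
  simp only [Nat.cast_zero, Nat.cast_ofNat]
  have h : (0 : Int) < (x :: t).length := by simp
  rw [pyRange3_cons 0 _ h]
  simp only [List.map_cons]
  refine List.cons_eq_cons.mpr ⟨by simp [PySem.List.pyGetD], ?_⟩
  have : ((x :: t).length : Int) = (t.length : Int) + 1 := by simp
  rw [this, show (0 : Int) + 3 = 2 + 1 by ring, pyRange3_shift 2 t.length, List.map_map]
  apply List.map_congr_left
  intro i hi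
  rw [PySem.List.pyRange_of_pos 2 _ (by norm_num)] at hi
  simp only [List.mem_map] at hi
  obtain ⟨k, _, rfl⟩ := hi
  have h0 : (0 : Int) ≤ 2 + 3 * (k : Int) := by positivity
  simp only [Function.comp]
  exact pyGetD_cons_succ x t _ h0

theorem gatherA_cons_succ (r : Nat) (x : Int) (t : List Int) :
    gatherA (r + 1) (x :: t) = gatherA r t := by
  unfold gatherA
  have : ((x :: t).length : Int) = (t.length : Int) + 1 := by simp
  rw [this]
  simp only [Nat.cast_add, Nat.cast_one]
  rw [pyRange3_shift r t.length, List.map_map]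
  apply List.map_congr_left
  intro i hi
  rw [PySem.List.pyRange_of_pos r _ (by norm_num)] at hi
  simp only [List.mem_map] at hi
  obtain ⟨k, _, rfl⟩ := hi
  have h0 : (0 : Int) ≤ (r : Int) + 3 * (k : Int) := by positivity
  simp only [Function.comp]
  exact pyGetD_cons_succ x t _ h0

theorem gatherA_eq_bk (q : List Int) :
    gatherA 0 q = (bk q 0).1 ∧ gatherA 1 q = (bk q 0).2.1 ∧ gatherA 2 q = (bk q 0).2.2 := by
  induction q with
  | nil => simp [gatherA, bk, PySem.List.pyRange]
  | cons x t ih =>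
    obtain ⟨h0, h1, h2⟩ := ih
    refine ⟨?_, ?_, ?_⟩
    · rw [gatherA_cons_zero, h2]; simp [bk, bk_succ]
    · rw [show (1 : Nat) = 0 + 1 from rfl, gatherA_cons_succ, h0]; simp [bk, bk_succ]
    · rw [show (2 : Nat) = 1 + 1 from rfl, gatherA_cons_succ, h1]; simp [bk, bk_succ]

-- B's fold characterised by bk
theorem fold_eq_bk (t : List Int) : ∀ (s : Nat) (u v w : List Int),
    (PySem.List.enumerate t (s : Int)).foldl
      (fun d p =>
        d.modify (PySem.List.pyGetD securityLevels (PySem.Int.mod p.1 (securityLevels.length : Int)) 0)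
          [] (fun b => b ++ [p.2]))
      (PySem.Dict.mk [(128, u), (192, v), (256, w)]) =
    PySem.Dict.mk [(128, u ++ (bk t s).1), (192, v ++ (bk t s).2.1), (256, w ++ (bk t s).2.2)] := by
  induction t with
  | nil => intro s u v w; simp [bk, PySem.List.enumerate_nil]
  | cons x t ih =>
    intro s u v w
    rw [PySem.List.enumerate_cons, List.foldl_cons]
    have hmod : PySem.Int.mod (s : Int) ((securityLevels.length : Nat) : Int) = ((s % 3 : Nat) : Int) := by
      exact_mod_cast PySem.Int.mod_natCast s 3
    have hs1 : ((s : Int) + 1) = ((s + 1 : Nat) : Int) := by push_cast; ring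
    have h3 : s % 3 = 0 ∨ s % 3 = 1 ∨ s % 3 = 2 := by omega
    have hm128 : ∀ u' v' w' : List Int,
        (PySem.Dict.mk [((128:Int), u'), (192, v'), (256, w')]).modify 128 [] (fun b => b ++ [x]) =
        PySem.Dict.mk [(128, u' ++ [x]), (192, v'), (256, w')] := by
      intro u' v' w'
      simp [PySem.Dict.modify, PySem.Dict.insert, PySem.Dict.getD, PySem.Dict.get?, PySem.Dict.contains]
    have hm192 : ∀ u' v' w' : List Int,
        (PySem.Dict.mk [((128:Int), u'), (192, v'), (256, w')]).modify 192 [] (fun b => b ++ [x]) =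
        PySem.Dict.mk [(128, u'), (192, v' ++ [x]), (256, w')] := by
      intro u' v' w'
      simp [PySem.Dict.modify, PySem.Dict.insert, PySem.Dict.getD, PySem.Dict.get?, PySem.Dict.contains]
    have hm256 : ∀ u' v' w' : List Int,
        (PySem.Dict.mk [((128:Int), u'), (192, v'), (256, w')]).modify 256 [] (fun b => b ++ [x]) =
        PySem.Dict.mk [(128, u'), (192, v'), (256, w' ++ [x])] := by
      intro u' v' w'
      simp [PySem.Dict.modify, PySem.Dict.insert, PySem.Dict.getD, PySem.Dict.get?, PySem.Dict.contains]
    rcases h3 with h | h | h <;>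
      simp only [hmod, h, Nat.cast_ofNat, Nat.cast_zero, Nat.cast_one,
        show PySem.List.pyGetD securityLevels 0 0 = 128 from by decide,
        show PySem.List.pyGetD securityLevels 1 0 = 192 from by decide,
        show PySem.List.pyGetD securityLevels 2 0 = 256 from by decide,
        hm128, hm192, hm256] <;>
      rw [hs1, ih] <;>
      simp [bk, h, List.append_assoc]

-- ===== VERDICT (by name: the statement is the Claim_ definition above) =====
theorem partitq_spec : Claim_equal_partitq := by
  intro q _
  unfold Spec_partitq partitq partitq_alt
  have hfold := fold_eq_bk q 0 [] [] []
  simp only [Nat.cast_zero] at hfold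
  have hinit : PySem.Dict.ofList (securityLevels.map (fun lev => (lev, ([] : List Int)))) =
      PySem.Dict.mk [(128, []), (192, []), (256, [])] := by decide
  rw [hinit, hfold]
  obtain ⟨h0, h1, h2⟩ := gatherA_eq_bk q
  simp only [securityLevels, PySem.List.enumerate]
  simp [PySem.List.pyRange_one, List.range_succ, PySem.List.pyGetD,
        ← h0, ← h1, ← h2, gatherA]
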